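-- pv_equiv track=rewrite | github.com/guystern26/Query-Tester | packages/query-tester/stage/bin/spl/spl_normalizer.py | _normalize_line_whitespace
-- ===== SOURCE A (Python) =====
-- def _normalize_line_whitespace(line):
--     # type: (str) -> str
--     """
--     Collapse multiple spaces/tabs to single space within a line,
--     but skip content inside single or double quotes.
--     """
--     result = []  # type: list
--     i = 0
--     in_space = False
--
--     while i < len(line):
--         ch = line[i]
--
--         # Handle quoted strings — pass through verbatim
--         if ch in ('"', "'"):
--             if in_space:
--                 result.append(" ")
--                 in_space = False
--             quote_char = ch
--             result.append(ch)
--             i += 1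
--             while i < len(line):
--                 c = line[i]
--                 result.append(c)
--                 if c == "\\" and i + 1 < len(line):
--                     # Escaped character — include next char too
--                     i += 1
--                     result.append(line[i])
--                 elif c == quote_char:
--                     break
--                 i += 1
--             i += 1
--             continue
--
--         # Collapse whitespace (spaces and tabs)
--         if ch in (" ", "\t"):
--             in_space = True
--             i += 1
--             continue
--
--         if in_space:
--             result.append(" ")
--             in_space = False
--
--         result.append(ch)
--         i += 1
--
--     return "".join(result)
-- ===== SOURCE B (Python) =====
-- def _scan_quoted(line, i):
--     # line[i] is the opening quote; return index just past the segment
--     q = line[i]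
--     j = i + 1
--     n = len(line)
--     while j < n:
--         if line[j] == "\\" and j + 1 < n:
--             j += 2
--         elif line[j] == q:
--             return j + 1
--         else:
--             j += 1
--     return n
--
--
-- def _collapse(s):
--     # collapse runs of spaces/tabs to a single space
--     out = []
--     prev_ws = False
--     for ch in s:
--         if ch in " \t":
--             if not prev_ws:
--                 out.append(" ")
--             prev_ws = True
--         else:
--             out.append(ch)
--             prev_ws = False
--     return "".join(out)
--
--
-- def _normalize_line_whitespace(line):
--     # type: (str) -> str
--     """
--     Collapse runs of spaces/tabs to a single space outside quoted
--     substrings (quoted content passes through verbatim, backslash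
--     escapes honoured); trailing whitespace outside quotes is dropped.
--     Two phases: split into quoted/unquoted segments, then rewrite them.
--     """
--     segs = []  # list of (is_quoted, text)
--     i = 0
--     n = len(line)
--     while i < n:
--         if line[i] in "\"'":
--             j = _scan_quoted(line, i)
--             segs.append((True, line[i:j]))
--         else:
--             j = i
--             while j < n and line[j] not in "\"'":
--                 j += 1
--             segs.append((False, line[i:j]))
--         i = j
--     parts = []
--     for k, (quoted, text) in enumerate(segs):
--         if quoted:
--             parts.append(text)
--         else:
--             t = _collapse(text)
--             if k == len(segs) - 1 and t.endswith(" "):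
--                 t = t[:-1]
--             parts.append(t)
--     return "".join(parts)
-- ===== Notes on version B (the rewrite author's own statement) =====
-- stated objective: alternative
-- what changed: B replaces A's single-pass character state machine (in_space flag threaded through a while loop with inline quote handling) by a two-phase segmentation: first split the line into quoted/unquoted segments (with escape handling), then rewrite each segment independently (quoted verbatim, unquoted whitespace-collapsed, trailing space of the final unquoted segment dropped) and join.
import Mathlib
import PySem

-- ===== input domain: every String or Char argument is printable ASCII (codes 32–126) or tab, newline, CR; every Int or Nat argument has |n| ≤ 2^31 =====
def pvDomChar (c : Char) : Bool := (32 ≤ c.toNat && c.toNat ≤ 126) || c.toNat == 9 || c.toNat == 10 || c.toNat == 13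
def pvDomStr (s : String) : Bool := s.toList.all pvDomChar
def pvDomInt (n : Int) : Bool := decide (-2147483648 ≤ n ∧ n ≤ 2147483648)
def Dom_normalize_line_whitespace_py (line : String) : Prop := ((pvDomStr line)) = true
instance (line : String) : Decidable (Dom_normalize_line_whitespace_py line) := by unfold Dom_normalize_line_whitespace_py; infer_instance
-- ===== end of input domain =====

-- B is a two-phase re-implementation (segment into quoted/unquoted pieces, then rewrite each piece)
-- of A's single-pass in_space state machine; equality of the return values is proved on all inputs.

-- ===== PORT A =====
-- inner `while` of A's quote branch: copies chars verbatim, backslash escapes the next char,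
-- stops just past the closing quote; returns (chars appended, remaining input)
def pvQuoteScanA (q : Char) : List Char → List Char × List Char
  | [] => ([], [])
  | c :: rest =>
    if c = '\\' ∧ rest ≠ [] then
      match rest with
      | [] => ([c], [])
      | d :: rest' =>
        let p := pvQuoteScanA q rest'
        (c :: d :: p.1, p.2)
    else if c = q then ([c], rest)
    else
      let p := pvQuoteScanA q rest
      (c :: p.1, p.2)
termination_by l => l.length

-- needed by pvMainA's termination
theorem pvQuoteScanA_snd_le (q : Char) (l : List Char) :
    (pvQuoteScanA q l).2.length ≤ l.length := by
  induction l using pvQuoteScanA.induct q with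
  | case1 => simp [pvQuoteScanA]
  | case2 d h => exact absurd rfl h.2
  | case3 d d1 rest' h ih =>
    rw [pvQuoteScanA.eq_def]
    simp only [if_pos h]
    simp only [List.length_cons]
    omega
  | case4 rest' h =>
    rw [pvQuoteScanA.eq_def]
    simp only [if_neg h]
    simp
  | case5 d rest' h hq ih =>
    rw [pvQuoteScanA.eq_def]
    simp only [if_neg h, if_neg hq, List.length_cons]
    omega

-- A's outer `while` over the line, threading the in_space flag
def pvMainA : List Char → Bool → List Char
  | [], _ => []
  | c :: rest, in_space =>
    if c = '"' ∨ c = '\'' then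
      let p := pvQuoteScanA c rest
      (if in_space then [' '] else []) ++ c :: p.1 ++ pvMainA p.2 false
    else if c = ' ' ∨ c = '\t' then
      pvMainA rest true
    else
      (if in_space then [' '] else []) ++ c :: pvMainA rest false
termination_by l _ => l.length
decreasing_by
  · have := pvQuoteScanA_snd_le c rest
    simp only [List.length_cons]; omega
  · simp
  · simp

def normalize_line_whitespace_py (line : String) : String :=
  String.ofList (pvMainA line.toList false)

-- ===== PORT B =====
-- Source B _scan_quoted: the quoted segment after the opening quote, and the remainder
def pvScanQuotedB (q : Char) : List Char → List Char × List Char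
  | [] => ([], [])
  | c :: rest =>
    if c = '\\' ∧ rest ≠ [] then
      match rest with
      | [] => ([c], [])
      | d :: rest' =>
        let p := pvScanQuotedB q rest'
        (c :: d :: p.1, p.2)
    else if c = q then ([c], rest)
    else
      let p := pvScanQuotedB q rest
      (c :: p.1, p.2)
termination_by l => l.length

-- needed by pvSegsB's termination
theorem pvScanQuotedB_snd_le (q : Char) (l : List Char) :
    (pvScanQuotedB q l).2.length ≤ l.length := by
  induction l using pvScanQuotedB.induct q with
  | case1 => simp [pvScanQuotedB]
  | case2 d h => exact absurd rfl h.2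
  | case3 d d1 rest' h ih =>
    rw [pvScanQuotedB.eq_def]
    simp only [if_pos h]
    simp only [List.length_cons]
    omega
  | case4 rest' h =>
    rw [pvScanQuotedB.eq_def]
    simp only [if_neg h]
    simp
  | case5 d rest' h hq ih =>
    rw [pvScanQuotedB.eq_def]
    simp only [if_neg h, if_neg hq, List.length_cons]
    omega

-- Source B's inner `while j < n and line[j] not in "\"'"`: the unquoted run and the remainder
def pvUnqB : List Char → List Char × List Char
  | [] => ([], [])
  | c :: rest =>
    if c = '"' ∨ c = '\'' then ([], c :: rest)
    else
      let p := pvUnqB rest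
      (c :: p.1, p.2)

-- needed by pvSegsB's termination
theorem pvUnqB_snd_le (l : List Char) : (pvUnqB l).2.length ≤ l.length := by
  induction l with
  | nil => simp [pvUnqB]
  | cons c rest ih =>
    by_cases h : c = '"' ∨ c = '\''
    · simp [pvUnqB, h]
    · simp [pvUnqB, h]
      omega

-- Source B's segmentation loop: list of (is_quoted, text) segments
def pvSegsB : List Char → List (Bool × List Char)
  | [] => []
  | c :: rest =>
    if c = '"' ∨ c = '\'' then
      let p := pvScanQuotedB c rest
      (true, c :: p.1) :: pvSegsB p.2
    else
      let p := pvUnqB (c :: rest)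
      (false, p.1) :: pvSegsB p.2
termination_by l => l.length
decreasing_by
  · have := pvScanQuotedB_snd_le c rest
    simp only [List.length_cons]; omega
  · have h2 : (pvUnqB rest).2.length ≤ rest.length := pvUnqB_snd_le rest
    simp [pvUnqB, *]

-- Source B _collapse: runs of spaces/tabs become one space
def pvCollapseB : List Char → Bool → List Char
  | [], _ => []
  | c :: rest, prev_ws =>
    if c = ' ' ∨ c = '\t' then
      (if prev_ws then [] else [' ']) ++ pvCollapseB rest true
    else c :: pvCollapseB rest false

-- Source B: `if t.endswith(" "): t = t[:-1]`
def pvDropTrail (l : List Char) : List Char :=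
  if l.getLast? = some ' ' then l.dropLast else l

-- Source B's rewrite-and-join loop over the segments (last unquoted segment loses its trailing space)
def pvRenderB : List (Bool × List Char) → List Char
  | [] => []
  | [(false, t)] => pvDropTrail (pvCollapseB t false)
  | (true, t) :: rest => t ++ pvRenderB rest
  | (false, t) :: rest => pvCollapseB t false ++ pvRenderB rest

def normalize_line_whitespace_py_alt (line : String) : String :=
  String.ofList (pvRenderB (pvSegsB line.toList))

-- ===== PRECONDITION & SPEC =====
def Spec_normalize_line_whitespace_py (line : String) (out : String) : Prop := out = normalize_line_whitespace_py_alt line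
instance (line : String) (out : String) : Decidable (Spec_normalize_line_whitespace_py line out) := by unfold Spec_normalize_line_whitespace_py; infer_instance

-- ===== CLAIM (what is proved, stated in full; the proofs are below) =====
def Claim_equal_normalize_line_whitespace_py : Prop := ∀ (line : String), Dom_normalize_line_whitespace_py line → Spec_normalize_line_whitespace_py line (normalize_line_whitespace_py line)

-- ===== LEMMAS AND PROOFS =====

theorem pvScanQuotedB_eq (q : Char) (l : List Char) : pvScanQuotedB q l = pvQuoteScanA q l := by
  induction l using pvScanQuotedB.induct q with
  | case1 => simp [pvScanQuotedB, pvQuoteScanA]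
  | case2 d h => exact absurd rfl h.2
  | case3 d d1 rest' h ih =>
    rw [pvScanQuotedB.eq_def, pvQuoteScanA.eq_def]
    simp only [if_pos h, ih]
  | case4 rest' h =>
    rw [pvScanQuotedB.eq_def, pvQuoteScanA.eq_def]
    simp only [if_neg h]
    simp
  | case5 d rest' h hq ih =>
    rw [pvScanQuotedB.eq_def, pvQuoteScanA.eq_def]
    simp only [if_neg h, if_neg hq, ih]

-- A's whitespace collapse over a quote-free run, with the pending flag left at the end
def pvCA : List Char → Bool → List Char
  | [], _ => []
  | c :: rest, is =>
    if c = ' ' ∨ c = '\t' then pvCA rest true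
    else (if is then [' '] else []) ++ c :: pvCA rest false

def pvPend : List Char → Bool → Bool
  | [], is => is
  | c :: rest, _ =>
    if c = ' ' ∨ c = '\t' then pvPend rest true
    else pvPend rest false

theorem pvMainA_unq (u : List Char) :
    ∀ (r : List Char) (is : Bool), (∀ c ∈ u, ¬(c = '"' ∨ c = '\'')) →
    pvMainA (u ++ r) is = pvCA u is ++ pvMainA r (pvPend u is) := by
  induction u with
  | nil => intro r is _; simp [pvCA, pvPend]
  | cons c rest ih =>
    intro r is hu
    have hc : ¬(c = '"' ∨ c = '\'') := hu c (by simp)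
    have hrest : ∀ x ∈ rest, ¬(x = '"' ∨ x = '\'') := fun x hx => hu x (by simp [hx])
    by_cases hw : c = ' ' ∨ c = '\t'
    · simp [pvMainA, pvCA, pvPend, hc, hw, ih r true hrest]
    · simp [pvMainA, pvCA, pvPend, hc, hw, ih r false hrest]

theorem pvCollapse_cA (u : List Char) :
    ∀ (is : Bool),
    pvCA u is ++ (if pvPend u is then [' '] else []) = (if is then [' '] else []) ++ pvCollapseB u is := by
  induction u with
  | nil => intro is; cases is <;> simp [pvCA, pvPend, pvCollapseB]
  | cons c rest ih =>
    intro is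
    by_cases hw : c = ' ' ∨ c = '\t'
    · have := ih true
      cases is <;> simp_all [pvCA, pvPend, pvCollapseB]
    · have := ih false
      cases is <;> simp_all [pvCA, pvPend, pvCollapseB]

theorem pvCA_getLast (u : List Char) : ∀ (is : Bool), (pvCA u is).getLast? ≠ some ' ' := by
  induction u with
  | nil => intro is; simp [pvCA]
  | cons c rest ih =>
    intro is
    by_cases hw : c = ' ' ∨ c = '\t'
    · simpa [pvCA, hw] using ih true
    · have hc : c ≠ ' ' := fun h => hw (Or.inl h)
      have h2 : (c :: pvCA rest false).getLast? ≠ some ' ' := by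
        rcases h : pvCA rest false with _ | ⟨d, t⟩
        · simp [hc]
        · have := ih false
          rw [h] at this
          simpa using this
      cases is <;>
        simpa [pvCA, hw, List.getLast?_append] using h2

theorem pvDropTrail_cA (u : List Char) :
    pvDropTrail (pvCollapseB u false) = pvCA u false := by
  have h := pvCollapse_cA u false
  simp only [Bool.false_eq_true, if_false, List.nil_append] at h
  by_cases hp : pvPend u false = true
  · rw [← h, hp]
    simp only [if_pos, pvDropTrail]
    rw [List.getLast?_concat, List.dropLast_concat]
    simp
  · simp only [hp, if_neg, List.append_nil, Bool.not_eq_true] at h ⊢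
    rw [← h, pvDropTrail, if_neg (pvCA_getLast u false)]

theorem pvUnqB_decomp (l : List Char) :
    l = (pvUnqB l).1 ++ (pvUnqB l).2 ∧ (∀ c ∈ (pvUnqB l).1, ¬(c = '"' ∨ c = '\'')) ∧
    (∀ c r', (pvUnqB l).2 = c :: r' → (c = '"' ∨ c = '\'')) := by
  induction l with
  | nil => simp [pvUnqB]
  | cons c rest ih =>
    by_cases h : c = '"' ∨ c = '\''
    · refine ⟨by simp [pvUnqB, h], by simp [pvUnqB, h], ?_⟩
      intro d r' hd
      simp only [pvUnqB, if_pos h] at hd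
      injection hd with h1 _
      exact h1 ▸ h
    · obtain ⟨h1, h2, h3⟩ := ih
      refine ⟨?_, ?_, ?_⟩
      · simp only [pvUnqB, if_neg h, List.cons_append]
        exact congrArg (c :: ·) h1
      · intro d hd
        simp only [pvUnqB, if_neg h, List.mem_cons] at hd
        rcases hd with hd | hd
        · rw [hd]; exact h
        · exact h2 d hd
      · intro d r' hd
        simp only [pvUnqB, if_neg h] at hd
        exact h3 d r' hd

theorem pvMainA_quoteHead (c : Char) (r : List Char) (b : Bool)
    (hq : c = '"' ∨ c = '\'') :
    pvMainA (c :: r) b = (if b then [' '] else []) ++ pvMainA (c :: r) false := by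
  simp [pvMainA, hq]

theorem pvMain_eq_render : ∀ (n : ℕ) (l : List Char), l.length ≤ n →
    pvMainA l false = pvRenderB (pvSegsB l) := by
  intro n
  induction n with
  | zero =>
    intro l hl
    have : l = [] := List.length_eq_zero_iff.mp (Nat.le_zero.mp hl)
    subst this
    simp [pvMainA, pvSegsB, pvRenderB]
  | succ m ih =>
    intro l hl
    match l with
    | [] => simp [pvMainA, pvSegsB, pvRenderB]
    | c :: rest =>
      by_cases hq : c = '"' ∨ c = '\''
      · -- quoted segment first
        have hlen : (pvQuoteScanA c rest).2.length ≤ m := by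
          have := pvQuoteScanA_snd_le c rest
          simp only [List.length_cons] at hl
          omega
        have hseg : pvSegsB (c :: rest) =
            (true, c :: (pvQuoteScanA c rest).1) :: pvSegsB (pvQuoteScanA c rest).2 := by
          simp [pvSegsB, hq, pvScanQuotedB_eq]
        rw [hseg]
        have hrend : pvRenderB ((true, c :: (pvQuoteScanA c rest).1) :: pvSegsB (pvQuoteScanA c rest).2) =
            (c :: (pvQuoteScanA c rest).1) ++ pvRenderB (pvSegsB (pvQuoteScanA c rest).2) := by
          rfl
        rw [hrend, ← ih _ hlen]
        simp [pvMainA, hq]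
      · -- unquoted segment first
        obtain ⟨hdec, hnq, hqh⟩ := pvUnqB_decomp (c :: rest)
        set u := (pvUnqB (c :: rest)).1 with hu
        set r := (pvUnqB (c :: rest)).2 with hr
        have hseg : pvSegsB (c :: rest) = (false, u) :: pvSegsB r := by
          simp [pvSegsB, hq, ← hu, ← hr]
        have hmain : pvMainA (c :: rest) false = pvCA u false ++ pvMainA r (pvPend u false) := by
          conv_lhs => rw [hdec]
          exact pvMainA_unq u r false hnq
        have hune : u ≠ [] := by
          intro h0
          rw [h0] at hdec
          simp only [List.nil_append] at hdec
          exact hq (hqh c rest hdec.symm)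
        rcases hrc : r with _ | ⟨d, r'⟩
        · -- line ends with the unquoted segment
          rw [hseg, hrc]
          have hone : pvRenderB [(false, u)] = pvDropTrail (pvCollapseB u false) := rfl
          rw [pvSegsB, hone, hmain, hrc]
          rw [pvDropTrail_cA]
          simp [pvMainA]
        · -- a quoted segment follows
          have hd : d = '"' ∨ d = '\'' := hqh d r' hrc
          have hlenr : r.length ≤ m := by
            have h1 : (c :: rest).length = u.length + r.length := by
              rw [hdec]; simp
            have h2 : 1 ≤ u.length := by
              rcases u with _ | _
              · exact absurd rfl hune
              · simp
            simp only [List.length_cons] at h1 hl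
            omega
          have hsr : pvSegsB r ≠ [] := by
            rw [hrc]
            simp only [pvSegsB, if_pos hd]
            exact fun h => absurd h (by simp)
          have hrend : pvRenderB ((false, u) :: pvSegsB r) =
              pvCollapseB u false ++ pvRenderB (pvSegsB r) := by
            rcases hs : pvSegsB r with _ | ⟨⟨b, t⟩, s'⟩
            · exact absurd hs hsr
            · cases b <;> rfl
          rw [hseg, hrend, hmain, hrc,
              pvMainA_quoteHead d r' (pvPend u false) hd, ← hrc, ← List.append_assoc]
          have hco := pvCollapse_cA u false
          simp only [Bool.false_eq_true, if_false, List.nil_append] at hco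
          rw [hco, ih r hlenr, hrc]

-- ===== VERDICT (by name: the statement is the Claim_ definition above) =====
theorem normalize_line_whitespace_py_spec : Claim_equal_normalize_line_whitespace_py := by
  intro line _
  unfold Spec_normalize_line_whitespace_py normalize_line_whitespace_py normalize_line_whitespace_py_alt
  rw [pvMain_eq_render line.toList.length line.toList (le_refl _)]
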